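-- pv_equiv track=rewrite | github.com/sigridjineth/algorithm_log | codeplus/src/캠프준비_Q16938.py | dfs
-- ===== SOURCE A (Python) =====
-- def dfs(index, n, a, c, l, r, x):
--     if (index == n):
--         count = 0
--         total = 0
--         hard = -99999
--         easy = -99999
--
--         for i in range(n):
--             if (c[i] == False):
--                 continue
--             total += a[i]
--             count += 1
--             if (hard == -99999 or hard < a[i]):
--                 hard = a[i]
--             if (easy == -99999 or easy > a[i]):
--                 easy = a[i]
--
--         if (count >= 2 and l <= total <= r and (hard - easy) >= x):
--             return 1
--         else:
--             return 0
--
--     elif (index != n):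
--         c[index] = True
--         count1 = dfs(index + 1, n, a, c, l, r, x)
--         c[index] = False
--         count2 = dfs(index + 1, n, a, c, l, r, x)
--         return count1 + count2
-- ===== SOURCE B (Python) =====
-- # B: carries (count, total, hard, easy) incrementally through the subset recursion,
-- # so a leaf tests the carried state instead of rescanning c.  The accumulator update
-- # is A's loop body (including its -99999 "unset" marker) moved into the recursion.
-- # Like A, the call leaves c[index:n] all False (return-value equivalence is what is proved).
--
-- def _add(count, total, hard, easy, v):
--     return (count + 1, total + v,
--             v if (hard == -99999 or hard < v) else hard,
--             v if (easy == -99999 or easy > v) else easy)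
--
--
-- def dfs(index, n, a, c, l, r, x):
--     count, total, hard, easy = 0, 0, -99999, -99999
--     for i in range(index):
--         if c[i]:
--             count, total, hard, easy = _add(count, total, hard, easy, a[i])
--
--     def go(i, count, total, hard, easy):
--         if i == n:
--             return 1 if (count >= 2 and l <= total <= r and hard - easy >= x) else 0
--         taken = go(i + 1, *_add(count, total, hard, easy, a[i]))
--         return taken + go(i + 1, count, total, hard, easy)
--
--     result = go(index, count, total, hard, easy)
--     for i in range(index, n):
--         c[i] = False
--     return result
-- ===== Notes on version B (the rewrite author's own statement) =====
-- stated objective: alternative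
-- what changed: B carries the accumulator (count, total, hard, easy) incrementally through the subset recursion (A's leaf-loop body moved into the recursive step), so a leaf tests the carried state instead of rescanning the whole flag list; timing did not confirm a measurable speed-up, so none is claimed.
-- outside the precondition, e.g. on dfs(-1, 1, [5], [True], 0, 10, 0): A returns 0, B returns 1
import Mathlib
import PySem

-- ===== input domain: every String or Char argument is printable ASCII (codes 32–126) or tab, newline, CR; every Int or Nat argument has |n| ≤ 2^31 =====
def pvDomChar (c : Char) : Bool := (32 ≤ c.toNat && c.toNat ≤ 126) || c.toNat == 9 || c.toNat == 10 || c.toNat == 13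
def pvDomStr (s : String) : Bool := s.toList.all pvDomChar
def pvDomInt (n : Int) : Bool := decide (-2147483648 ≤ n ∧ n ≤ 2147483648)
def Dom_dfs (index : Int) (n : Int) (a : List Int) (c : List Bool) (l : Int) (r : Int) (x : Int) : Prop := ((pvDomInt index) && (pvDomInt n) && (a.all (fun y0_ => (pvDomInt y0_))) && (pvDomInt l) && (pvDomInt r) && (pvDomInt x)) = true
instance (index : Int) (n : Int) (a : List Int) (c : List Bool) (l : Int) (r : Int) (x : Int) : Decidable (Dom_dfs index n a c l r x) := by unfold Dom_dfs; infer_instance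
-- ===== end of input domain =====

-- B carries (count,total,hard,easy) through the recursion instead of rescanning c at every
-- leaf (alternative decomposition; a timing run did not confirm a measurable speed-up).
-- A mutates c (c[index:n] is all False afterwards); B performs the same mutation in
-- Python; the equivalence proved here is about the RETURN value.

-- ===== PORT A =====
-- A's leaf loop body: for a chosen index i, update (count, total, hard, easy)
def dfsLeafStep (a : List Int) (c : List Bool) (s : Int × Int × Int × Int) (i : Nat) : Int × Int × Int × Int :=
  if (c.getD i false) = false then s
  else
    let v := a.getD i 0
    (s.1 + 1, s.2.1 + v,
     if s.2.2.1 = -99999 ∨ s.2.2.1 < v then v else s.2.2.1,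
     if s.2.2.2 = -99999 ∨ s.2.2.2 > v then v else s.2.2.2)

def dfs (index : Int) (n : Int) (a : List Int) (c : List Bool) (l : Int) (r : Int) (x : Int) : Int :=
  if index = n then
    let s := (List.range n.toNat).foldl (dfsLeafStep a c) (0, 0, -99999, -99999)
    if s.1 ≥ 2 ∧ l ≤ s.2.1 ∧ s.2.1 ≤ r ∧ s.2.2.1 - s.2.2.2 ≥ x then 1 else 0
  else if index < n then
    -- c[index] = True; recurse; c[index] = False; recurse (functional rendering of the mutation)
    let c1 := c.set index.toNat true
    let count1 := dfs (index + 1) n a c1 l r x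
    let c2 := c1.set index.toNat false
    let count2 := dfs (index + 1) n a c2 l r x
    count1 + count2
  else 0  -- guard for totality: Python recurses forever here (index > n), excluded by Pre_
termination_by (n - index).toNat
decreasing_by
  · omega
  · omega

-- ===== PORT B =====
-- B's _add: fold one chosen value v into the carried accumulator
def dfsAddState (count total hard easy v : Int) : Int × Int × Int × Int :=
  (count + 1, total + v,
   if hard = -99999 ∨ hard < v then v else hard,
   if easy = -99999 ∨ easy > v then v else easy)

-- B's inner go: recursion over positions index..n-1 carrying the accumulator; O(1) leaf
def dfsAltGo (n : Int) (a : List Int) (l r x : Int) (i count total hard easy : Int) : Int :=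
  if i = n then
    if count ≥ 2 ∧ l ≤ total ∧ total ≤ r ∧ hard - easy ≥ x then 1 else 0
  else if i < n then
    let s := dfsAddState count total hard easy (a.getD i.toNat 0)
    dfsAltGo n a l r x (i + 1) s.1 s.2.1 s.2.2.1 s.2.2.2 +
      dfsAltGo n a l r x (i + 1) count total hard easy
  else 0  -- guard for totality: Python recurses forever here, excluded by Pre_
termination_by (n - i).toNat
decreasing_by
  · omega
  · omega

def dfs_alt (index : Int) (n : Int) (a : List Int) (c : List Bool) (l : Int) (r : Int) (x : Int) : Int :=
  let s := (List.range index.toNat).foldl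
    (fun s i => if c.getD i false then dfsAddState s.1 s.2.1 s.2.2.1 s.2.2.2 (a.getD i 0) else s)
    (0, 0, -99999, -99999)
  dfsAltGo n a l r x index s.1 s.2.1 s.2.2.1 s.2.2.2

-- ===== PRECONDITION & SPEC =====
-- Pre_ admits the natural call shape 0 ≤ index ≤ n ≤ len(a), len(c), and any immediate leaf
-- call index = n whose scan stays in range (n ≤ len(c) and every True flag below n lies inside
-- a): outside these A raises IndexError or RecursionError, except for a few returning cases
-- that rely on Python negative-index wraparound into c, which B does not reproduce.
def Pre_dfs (index : Int) (n : Int) (a : List Int) (c : List Bool) (l : Int) (r : Int) (x : Int) : Prop :=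
  (0 ≤ index ∧ index ≤ n ∧ n ≤ (a.length : Int) ∧ n ≤ (c.length : Int)) ∨
    (index = n ∧ n ≤ (c.length : Int) ∧ ∀ i : Nat, i < n.toNat → c.getD i false = true → i < a.length)
instance (index : Int) (n : Int) (a : List Int) (c : List Bool) (l : Int) (r : Int) (x : Int) : Decidable (Pre_dfs index n a c l r x) := by unfold Pre_dfs; infer_instance

def pvWitness_dfs : Int × Int × List Int × List Bool × Int × Int × Int := (1, 2, [1, 5], [true, false], 0, 10, 3)

def Spec_dfs (index : Int) (n : Int) (a : List Int) (c : List Bool) (l : Int) (r : Int) (x : Int) (out : Int) : Prop := out = dfs_alt index n a c l r x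
instance (index : Int) (n : Int) (a : List Int) (c : List Bool) (l : Int) (r : Int) (x : Int) (out : Int) : Decidable (Spec_dfs index n a c l r x out) := by unfold Spec_dfs; infer_instance

-- ===== CLAIM (what is proved, stated in full; the proofs are below) =====
def Claim_equal_dfs : Prop := ∀ (index : Int) (n : Int) (a : List Int) (c : List Bool) (l : Int) (r : Int) (x : Int), Dom_dfs index n a c l r x → Pre_dfs index n a c l r x → Spec_dfs index n a c l r x (dfs index n a c l r x)

-- ===== LEMMAS AND PROOFS =====

-- the accumulator after scanning the first k flags of c (B's prefix fold, named for the proof)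
def pvState (a : List Int) (c : List Bool) (k : Nat) : Int × Int × Int × Int :=
  (List.range k).foldl
    (fun s i => if c.getD i false then dfsAddState s.1 s.2.1 s.2.2.1 s.2.2.2 (a.getD i 0) else s)
    (0, 0, -99999, -99999)

lemma pvStep_eq (a : List Int) (c : List Bool) (s : Int × Int × Int × Int) (i : Nat) :
    dfsLeafStep a c s i =
      if c.getD i false then dfsAddState s.1 s.2.1 s.2.2.1 s.2.2.2 (a.getD i 0) else s := by
  cases h : c.getD i false
  · simp only [dfsLeafStep, h]
    simp
  · simp only [dfsLeafStep, dfsAddState, h]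
    simp

lemma pvState_eq_leaf (a : List Int) (c : List Bool) (k : Nat) :
    (List.range k).foldl (dfsLeafStep a c) (0, 0, -99999, -99999) = pvState a c k := by
  unfold pvState
  congr 1
  funext s i
  exact pvStep_eq a c s i

lemma pvState_set_ge (a : List Int) (c : List Bool) (i : Nat) (b : Bool) (k : Nat) (hk : k ≤ i) :
    pvState a (c.set i b) k = pvState a c k := by
  unfold pvState
  apply PySem.List.foldl_congr_mem
  intro s j hj
  have hji : j < k := List.mem_range.mp hj
  have hne : (c.set i b).getD j false = c.getD j false := by
    simp only [List.getD, List.getElem?_set]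
    have : ¬ i = j := by omega
    simp [this]
  rw [hne]

lemma pvState_succ (a : List Int) (c : List Bool) (k : Nat) :
    pvState a c (k + 1) =
      (fun s => if c.getD k false then dfsAddState s.1 s.2.1 s.2.2.1 s.2.2.2 (a.getD k 0) else s)
        (pvState a c k) := by
  unfold pvState
  rw [List.range_succ, List.foldl_append]
  simp

lemma pvState_set_true (a : List Int) (c : List Bool) (i : Nat) (hi : i < c.length) :
    pvState a (c.set i true) (i + 1) =
      (fun s => dfsAddState s.1 s.2.1 s.2.2.1 s.2.2.2 (a.getD i 0)) (pvState a c i) := by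
  rw [pvState_succ, pvState_set_ge a c i true i le_rfl]
  have hg : (c.set i true).getD i false = true := by
    simp [List.getD, List.getElem?_set_self hi]
  simp only [hg]
  simp

lemma pvState_set_false (a : List Int) (c : List Bool) (i : Nat) :
    pvState a (c.set i false) (i + 1) = pvState a c i := by
  rw [pvState_succ, pvState_set_ge a c i false i le_rfl]
  have hg : (c.set i false).getD i false = false := by
    by_cases hi : i < c.length
    · simp [List.getD, List.getElem?_set_self hi]
    · have hset : c.set i false = c := List.set_eq_of_length_le (by omega)
      rw [hset]
      exact List.getD_eq_default c false (by omega)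
  simp only [hg]
  simp

-- main invariant: started at position 'index' with the accumulator of the first 'index' flags,
-- A's recursion equals B's carried recursion
lemma pv_main (n : Int) (a : List Int) (l r x : Int) :
    ∀ (m : Nat) (index : Int) (c : List Bool), 0 ≤ index → index + (m : Int) = n →
      n ≤ (c.length : Int) →
      dfs index n a c l r x =
        (dfsAltGo n a l r x index (pvState a c index.toNat).1 (pvState a c index.toNat).2.1
          (pvState a c index.toNat).2.2.1 (pvState a c index.toNat).2.2.2) := by
  intro m
  induction m with
  | zero =>
      intro index c h0 hm _
      have hin : index = n := by omega
      subst hin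
      rw [dfs, if_pos rfl, dfsAltGo, if_pos rfl]
      simp only [pvState_eq_leaf]
  | succ m ih =>
      intro index c h0 hm hc
      have hlt : index < n := by omega
      have hne : ¬ index = n := by omega
      rw [dfs]
      simp only [if_neg hne, if_pos hlt]
      have hiL : index.toNat < c.length := by omega
      have hlen1 : ((c.set index.toNat true).length : Int) = (c.length : Int) := by simp
      have h1 := ih (index + 1) (c.set index.toNat true) (by omega) (by omega) (by omega)
      have h2 := ih (index + 1) ((c.set index.toNat true).set index.toNat false) (by omega) (by omega)
        (by simp; omega)
      have htn : (index + 1).toNat = index.toNat + 1 := by omega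
      rw [h1, h2, htn]
      rw [pvState_set_true a c index.toNat hiL]
      have hsf : pvState a ((c.set index.toNat true).set index.toNat false) (index.toNat + 1)
          = pvState a c index.toNat := by
        rw [pvState_set_false a (c.set index.toNat true) index.toNat,
            pvState_set_ge a c index.toNat true index.toNat le_rfl]
      rw [hsf]
      conv_rhs => rw [dfsAltGo]
      simp only [if_neg hne, if_pos hlt]

-- the index = n case needs no bounds at all: both sides fold the same prefix
lemma pv_base (n : Int) (a : List Int) (c : List Bool) (l r x : Int) :
    dfs n n a c l r x = dfs_alt n n a c l r x := by
  unfold dfs_alt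
  rw [dfs, if_pos rfl, dfsAltGo, if_pos rfl]
  rw [pvState_eq_leaf]
  rfl

-- ===== VERDICT (by name: the statement is the Claim_ definition above) =====
theorem dfs_spec : Claim_equal_dfs := by
  intro index n a c l r x _ hpre
  unfold Spec_dfs
  rcases hpre with ⟨h0, hn, -, hc⟩ | ⟨hin, -, -⟩
  · have := pv_main n a l r x (n - index).toNat index c h0 (by omega) hc
    rw [this]
    rfl
  · subst hin
    exact pv_base _ a c l r x
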